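-- pv_equiv track=rewrite | github.com/mojotech-no/student-plc-translator | src/plctranslator/tia_translator.py | find_project_name
-- ===== SOURCE A (Python) =====
-- def find_project_name(full_text: str) -> str:
--     """Find and store the project name from the SCL file."""
--     lines = full_text.split("\n")
--     for i in range(len(lines)):
--         if "FUNCTION_BLOCK " in lines[i]:
--             start_index = lines[i].find('"')
--             stop_index = lines[i].find('"', 16)
--             project_name = lines[i][start_index + 1 : stop_index]
--     return project_name
-- ===== SOURCE B (Python) =====
-- def find_project_name(full_text: str) -> str:
--     """Find and store the project name from the SCL file."""
--     idx = full_text.rfind("FUNCTION_BLOCK ")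
--     if idx == -1:
--         raise ValueError("no FUNCTION_BLOCK line found")
--     start = full_text.rfind("\n", 0, idx) + 1
--     end = full_text.find("\n", idx)
--     if end == -1:
--         end = len(full_text)
--     line = full_text[start:end]
--     return line[line.find('"') + 1 : line.find('"', 16)]
-- ===== Notes on version B (the rewrite author's own statement) =====
-- stated objective: alternative
-- what changed: B never splits the text into lines: it locates the last occurrence of 'FUNCTION_BLOCK ' with one rfind over the whole text, recovers the enclosing line from the surrounding newline positions (rfind/find), and extracts the quoted name from that single line, instead of A's loop over all split lines that overwrites an accumulator.
import Mathlib
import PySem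

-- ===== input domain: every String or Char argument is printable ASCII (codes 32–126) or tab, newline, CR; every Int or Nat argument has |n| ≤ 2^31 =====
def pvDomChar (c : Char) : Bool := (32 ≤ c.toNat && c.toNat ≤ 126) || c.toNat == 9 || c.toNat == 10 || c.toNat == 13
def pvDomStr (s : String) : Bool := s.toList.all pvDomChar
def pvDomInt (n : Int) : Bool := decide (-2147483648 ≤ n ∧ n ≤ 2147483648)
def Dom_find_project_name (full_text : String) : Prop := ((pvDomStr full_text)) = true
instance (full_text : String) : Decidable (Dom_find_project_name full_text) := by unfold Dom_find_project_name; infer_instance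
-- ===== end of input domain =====

-- B never splits the text into lines: it finds the last "FUNCTION_BLOCK " occurrence with one
-- rfind over the whole text and recovers the enclosing line from the surrounding newline
-- positions, instead of A's loop over all split lines overwriting an accumulator (objective: alternative).


-- ===== PORT A =====
-- both Pythons share these identical extraction lines: find('"'), find('"', 16), slice
def pvExtract (line : String) : String :=
  let start_index := PySem.Str.find line "\""
  let stop_index := PySem.Str.findFrom line "\"" 16
  PySem.Str.slice line (some (start_index + 1)) (some stop_index)

-- project_name unassigned = none; Pre_ guarantees it is assigned (Python raises UnboundLocalError otherwise)
def find_project_name (full_text : String) : String :=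
  let lines := ((PySem.Str.split? full_text "\n").getD [])
  let res := (PySem.List.pyRange 0 lines.length 1).foldl
    (fun acc i =>
      let line := PySem.List.pyGetD lines i ""
      if PySem.Str.isIn "FUNCTION_BLOCK " line then some (pvExtract line) else acc) none
  res.getD ""

-- ===== PORT B =====
def find_project_name_alt (full_text : String) : String :=
  let idx := PySem.Str.rfind full_text "FUNCTION_BLOCK "
  if idx = -1 then ""  -- Python B raises ValueError here; excluded by Pre_
  else
    let start := PySem.Str.rfindFrom full_text "\n" 0 (some idx) + 1
    let stop := PySem.Str.findFrom full_text "\n" idx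
    let stop := if stop = -1 then PySem.Str.len full_text else stop
    let line := PySem.Str.slice full_text (some start) (some stop)
    pvExtract line

-- ===== PRECONDITION & SPEC =====
-- Pre_ excludes exactly the inputs with no line containing "FUNCTION_BLOCK ": there Python A
-- raises UnboundLocalError and Python B raises ValueError, so neither returns.
def Pre_find_project_name (full_text : String) : Prop :=
  (((PySem.Str.split? full_text "\n").getD [])).any (fun l => PySem.Str.isIn "FUNCTION_BLOCK " l) = true
instance (full_text : String) : Decidable (Pre_find_project_name full_text) := by
  unfold Pre_find_project_name; infer_instance

def pvWitness_find_project_name : String := "FUNCTION_BLOCK \"Proj\"\nBEGIN"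

def Spec_find_project_name (full_text : String) (out : String) : Prop := out = find_project_name_alt full_text
instance (full_text : String) (out : String) : Decidable (Spec_find_project_name full_text out) := by unfold Spec_find_project_name; infer_instance

-- ===== CLAIM (what is proved, stated in full; the proofs are below) =====
def Claim_equal_find_project_name : Prop := ∀ (full_text : String), Dom_find_project_name full_text → Pre_find_project_name full_text → Spec_find_project_name full_text (find_project_name full_text)

-- ===== LEMMAS AND PROOFS =====

-- structural single-character split, proved equal to PySem.Chars.splitOn below
def splitChar (c : Char) : List Char → List (List Char)
  | [] => [[]]
  | x :: xs => if x = c then [] :: splitChar c xs else (splitChar c xs).modifyHead (x :: ·)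

theorem splitChar_ne_nil (c : Char) (s : List Char) : splitChar c s ≠ [] := by
  induction s with
  | nil => simp [splitChar]
  | cons x xs ih =>
    simp only [splitChar]
    split
    · simp
    · intro h
      cases hx : splitChar c xs with
      | nil => exact ih hx
      | cons a t => rw [hx] at h; simp at h

theorem splitOn_go_spec (c : Char) (l cur : List Char) (acc : List (List Char)) (fuel : Nat)
    (h : l.length ≤ fuel) :
    PySem.Chars.splitOn.go [c] fuel l cur acc
      = acc.reverse ++ (splitChar c l).modifyHead (cur.reverse ++ ·) := by
  induction l generalizing fuel cur acc with
  | nil =>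
    cases fuel with
    | zero => simp [PySem.Chars.splitOn.go, splitChar]
    | succ f => simp [PySem.Chars.splitOn.go, splitChar]
  | cons x xs ih =>
    cases fuel with
    | zero => simp at h
    | succ f =>
      have hf : xs.length ≤ f := by simpa using h
      by_cases hxc : x = c
      · subst hxc
        rw [show PySem.Chars.splitOn.go [x] (f+1) (x :: xs) cur acc
              = PySem.Chars.splitOn.go [x] f xs [] (cur.reverse :: acc) by
            simp [PySem.Chars.splitOn.go, List.isPrefixOf]]
        rw [ih [] (cur.reverse :: acc) f hf]
        simp [splitChar]
        cases splitChar x xs <;> simp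
      · rw [show PySem.Chars.splitOn.go [c] (f+1) (x :: xs) cur acc
              = PySem.Chars.splitOn.go [c] f xs (x :: cur) acc by
            simp only [PySem.Chars.splitOn.go, List.isPrefixOf, Bool.and_true]
            rw [if_neg]
            simp only [beq_iff_eq]
            exact fun hh => hxc hh.symm]
        rw [ih (x :: cur) acc f hf]
        simp only [splitChar, if_neg hxc]
        cases hs : splitChar c xs with
        | nil => exact absurd hs (splitChar_ne_nil c xs)
        | cons a t => simp

theorem splitOn_eq_splitChar (c : Char) (s : List Char) :
    PySem.Chars.splitOn s [c] = splitChar c s := by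
  rw [PySem.Chars.splitOn, splitOn_go_spec c s [] [] (s.length + 1) (by omega)]
  cases hs : splitChar c s with
  | nil => exact absurd hs (splitChar_ne_nil c s)
  | cons a t => simp

-- reconstruction of the text from its pieces
theorem splitChar_reconstruct (c : Char) (s : List Char) :
    List.intercalate [c] (splitChar c s) = s := by
  induction s with
  | nil => simp [splitChar, List.intercalate, List.intersperse]
  | cons x xs ih =>
    by_cases hxc : x = c
    · subst hxc
      simp only [splitChar, if_pos rfl]
      cases hs : splitChar x xs with
      | nil => exact absurd hs (splitChar_ne_nil x xs)
      | cons r rs =>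
        rw [hs] at ih
        simp [List.intercalate, List.intersperse] at ih ⊢
        cases rs <;> simp_all [List.intercalate, List.intersperse]
    · simp only [splitChar, if_neg hxc]
      cases hs : splitChar c xs with
      | nil => exact absurd hs (splitChar_ne_nil c xs)
      | cons r rs =>
        rw [hs] at ih
        cases rs <;> simp_all [List.intercalate, List.intersperse]

theorem splitChar_cfree (c : Char) (s : List Char) :
    ∀ p ∈ splitChar c s, c ∉ p := by
  induction s with
  | nil => simp [splitChar]
  | cons x xs ih =>
    intro p hp
    by_cases hxc : x = c
    · subst hxc
      rw [splitChar, if_pos rfl, List.mem_cons] at hp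
      rcases hp with hp | hp
      · subst hp; simp
      · exact ih p hp
    · rw [splitChar, if_neg hxc] at hp
      cases hs : splitChar c xs with
      | nil => exact absurd hs (splitChar_ne_nil c xs)
      | cons r rs =>
        rw [hs, List.modifyHead_cons, List.mem_cons] at hp
        rcases hp with hp | hp
        · subst hp
          intro hc
          rw [List.mem_cons] at hc
          rcases hc with hc | hc
          · exact hxc hc.symm
          · exact ih r (by rw [hs]; exact List.mem_cons_self) hc
        · exact ih p (by rw [hs]; exact List.mem_cons_of_mem _ hp)

-- intercalate of a decomposed pieces list
theorem intercalate_decomp (c : Char) (pre suf : List (List Char)) (L : List Char) :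
    List.intercalate [c] (pre ++ L :: suf)
      = (pre.map (· ++ [c])).flatten ++ L ++ (suf.map ([c] ++ ·)).flatten := by
  induction pre with
  | nil =>
    simp only [List.nil_append, List.map_nil, List.flatten_nil]
    induction suf with
    | nil => simp [List.intercalate, List.intersperse]
    | cons m ms ihm =>
      simp [List.intercalate, List.intersperse] at ihm ⊢
      cases ms <;> simp_all [List.intercalate, List.intersperse]
  | cons a pre ihp =>
    simp [List.intercalate, List.intersperse] at ihp ⊢
    cases pre <;> simp_all [List.intercalate, List.intersperse]

-- ----- rfind characterisation -----
theorem rfind_go_spec (s sub : List Char) (j : Nat) :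
    (PySem.Chars.rfind.go s sub j = -1 ∧ ∀ i ≤ j, ¬ sub <+: s.drop i)
    ∨ (∃ r : Nat, PySem.Chars.rfind.go s sub j = (r : Int) ∧ r ≤ j ∧ sub <+: s.drop r
        ∧ ∀ i, r < i → i ≤ j → ¬ sub <+: s.drop i) := by
  induction j with
  | zero =>
    by_cases hp : sub <+: s
    · right
      exact ⟨0, by simp [PySem.Chars.rfind.go, List.isPrefixOf_iff_prefix, hp],
        le_refl 0, by simpa using hp, by omega⟩
    · left
      refine ⟨by simp [PySem.Chars.rfind.go, List.isPrefixOf_iff_prefix, hp], ?_⟩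
      intro i hi
      interval_cases i
      simpa using hp
  | succ j ih =>
    by_cases hp : sub <+: s.drop (j + 1)
    · right
      exact ⟨j + 1, by simp [PySem.Chars.rfind.go, List.isPrefixOf_iff_prefix, hp],
        le_refl _, hp, by omega⟩
    · have hgo : PySem.Chars.rfind.go s sub (j + 1) = PySem.Chars.rfind.go s sub j := by
        simp [PySem.Chars.rfind.go, List.isPrefixOf_iff_prefix, hp]
      rcases ih with ⟨h1, h2⟩ | ⟨r, h1, h2, h3, h4⟩
      · left
        refine ⟨hgo.trans h1, ?_⟩
        intro i hi
        rcases Nat.lt_or_ge i (j + 1) with hlt | hge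
        · exact h2 i (by omega)
        · have : i = j + 1 := by omega
          subst this; exact hp
      · right
        refine ⟨r, hgo.trans h1, by omega, h3, ?_⟩
        intro i hri hij
        rcases Nat.lt_or_ge i (j + 1) with hlt | hge
        · exact h4 i hri (by omega)
        · have : i = j + 1 := by omega
          subst this; exact hp

theorem rfind_eq_of (s sub : List Char) (r : Nat) (hne : sub ≠ [])
    (hocc : sub <+: s.drop r) (hmax : ∀ i, r < i → ¬ sub <+: s.drop i) :
    PySem.Chars.rfind s sub = (r : Int) := by
  have hr : r ≤ s.length := by
    by_contra hgt
    rw [List.drop_eq_nil_of_le (by omega)] at hocc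
    exact hne (List.prefix_nil.mp hocc)
  rw [PySem.Chars.rfind]
  rcases rfind_go_spec s sub s.length with ⟨h1, h2⟩ | ⟨r', h1, h2, h3, h4⟩
  · exact absurd hocc (h2 r hr)
  · rw [h1]
    congr 1
    rcases Nat.lt_trichotomy r r' with h | h | h
    · exact absurd h3 (hmax r' h)
    · exact h.symm
    · exact absurd hocc (h4 r h hr)

theorem rfind_eq_neg_one_of (s sub : List Char) (h : ∀ i, ¬ sub <+: s.drop i) :
    PySem.Chars.rfind s sub = -1 := by
  rw [PySem.Chars.rfind]
  rcases rfind_go_spec s sub s.length with ⟨h1, _⟩ | ⟨r, _, _, h3, _⟩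
  · exact h1
  · exact absurd h3 (h r)

theorem find_eq_of (t sub : List Char) (q : Nat)
    (hocc : sub <+: t.drop q) (hmin : ∀ i, i < q → ¬ sub <+: t.drop i) :
    PySem.Chars.find t sub = (q : Int) := by
  have hinf : sub <:+: t := hocc.isInfix.trans (List.drop_suffix q t).isInfix
  have h0 : 0 ≤ PySem.Chars.find t sub := (PySem.Chars.find_nonneg_iff t sub).mpr hinf
  obtain ⟨hocc', hmin'⟩ := PySem.Chars.find_spec h0
  have : (PySem.Chars.find t sub).toNat = q := by
    rcases Nat.lt_trichotomy (PySem.Chars.find t sub).toNat q with h | h | h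
    · exact absurd hocc' (hmin _ h)
    · exact h
    · exact absurd hocc (hmin' q h)
  omega

theorem rfindFrom_zero_some (s sub : List Char) (e : Nat) (he : e ≤ s.length) :
    PySem.Chars.rfindFrom s sub 0 (some (e : Int)) = PySem.Chars.rfind (s.take e) sub := by
  rw [PySem.Chars.rfindFrom]
  have h1 : ¬ ((s.length : Int) < (e : Int)) := by exact_mod_cast not_lt.mpr he
  have h2 : ¬ ((e : Int) < 0) := by omega
  simp only [h1, if_false, h2, if_neg (lt_irrefl (0:Int))]
  have h3 : ((e : Int)).toNat = e := by omega
  by_cases hr : PySem.Chars.rfind (s.take e) sub = -1 <;>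
    simp [h3, hr]

-- ----- occurrence plumbing -----
theorem prefix_append_left (sub A B : List Char) (h : sub <+: A) : sub <+: A ++ B :=
  h.trans (A.prefix_append B)

-- a prefix of A ++ B that fits inside A is a prefix of A
theorem prefix_of_prefix_append (sub A B : List Char) (h : sub <+: A ++ B)
    (hlen : sub.length ≤ A.length) : sub <+: A := by
  have h1 : sub = (A ++ B).take sub.length := (List.prefix_iff_eq_take.mp h)
  rw [List.take_append, show sub.length - A.length = 0 by omega, List.take_zero,
    List.append_nil] at h1
  rw [h1]
  exact List.take_prefix sub.length A

-- splitting an occurrence of a c-free pattern around a c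
theorem cfree_occ_split (sub X Y : List Char) (c : Char) (hc : c ∉ sub) (_hne : sub ≠ [])
    (i : Nat) (h : sub <+: (X ++ c :: Y).drop i) :
    (i + sub.length ≤ X.length ∧ sub <+: X.drop i) ∨
    (X.length < i ∧ sub <+: Y.drop (i - X.length - 1)) := by
  by_cases hi : i ≤ X.length
  · rw [List.drop_append, show i - X.length = 0 by omega, List.drop_zero] at h
    by_cases hfit : sub.length ≤ (X.drop i).length
    · left
      refine ⟨by simp at hfit; omega, prefix_of_prefix_append sub _ _ h hfit⟩
    · exfalso
      apply hc
      have h1 : sub = (X.drop i ++ c :: Y).take sub.length := List.prefix_iff_eq_take.mp h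
      rw [List.take_append] at h1
      have h2 : sub.length - (X.drop i).length ≠ 0 := by
        simp only [List.length_drop]; simp at hfit ⊢; omega
      rw [h1]
      apply List.mem_append_right
      rcases Nat.exists_eq_succ_of_ne_zero h2 with ⟨k, hk⟩
      rw [hk, List.take_succ_cons]
      exact List.mem_cons_self
  · right
    rw [List.drop_append, List.drop_eq_nil_of_le (by omega), List.nil_append,
      show i - X.length = (i - X.length - 1) + 1 by omega, List.drop_succ_cons] at h
    exact ⟨by omega, h⟩

-- no occurrence of a c-free pattern inside l ++ flatten (suf.map ([c] ++ ·)) if no piece contains it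
theorem no_occ_concat (sub : List Char) (c : Char) (hc : c ∉ sub) (hne : sub ≠ [])
    (l : List Char) (suf : List (List Char)) (hl : ¬ sub <:+: l)
    (hsuf : ∀ m ∈ suf, ¬ sub <:+: m) :
    ∀ j, ¬ sub <+: (l ++ (suf.map ([c] ++ ·)).flatten).drop j := by
  induction suf generalizing l with
  | nil =>
    intro j h
    simp only [List.map_nil, List.flatten_nil, List.append_nil] at h
    exact hl (h.isInfix.trans (List.drop_suffix j l).isInfix)
  | cons m ms ih =>
    intro j h
    rw [show (((m :: ms).map ([c] ++ ·)).flatten) = c :: (m ++ (ms.map ([c] ++ ·)).flatten) by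
        simp, show l ++ c :: (m ++ (ms.map ([c] ++ ·)).flatten)
          = l ++ c :: (m ++ (ms.map ([c] ++ ·)).flatten) from rfl] at h
    rcases cfree_occ_split sub l (m ++ (ms.map ([c] ++ ·)).flatten) c hc hne j h with
      ⟨_, h2⟩ | ⟨_, h2⟩
    · exact hl (h2.isInfix.trans (List.drop_suffix j l).isInfix)
    · exact ih m (hsuf m List.mem_cons_self) (fun x hx => hsuf x (List.mem_cons_of_mem _ hx)) _ h2

-- last element of the flattened prefix block is c
theorem pre_block_last (c : Char) (pre : List (List Char)) (hne : pre ≠ []) :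
    ∃ P', (pre.map (· ++ [c])).flatten = P' ++ [c] := by
  induction pre with
  | nil => exact absurd rfl hne
  | cons a pre ih =>
    cases pre with
    | nil => exact ⟨a, by simp⟩
    | cons b t =>
      obtain ⟨P', hP'⟩ := ih (by simp)
      refine ⟨a ++ [c] ++ P', ?_⟩
      have : (List.map (fun x => x ++ [c]) (a :: b :: t)).flatten
          = (a ++ [c]) ++ (List.map (fun x => x ++ [c]) (b :: t)).flatten := by simp
      rw [this, hP']
      simp

-- [c] is a prefix iff the head is c
theorem singleton_prefix_iff (c : Char) (t : List Char) : [c] <+: t ↔ ∃ t', t = c :: t' := by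
  cases t with
  | nil => simp
  | cons x xs => constructor
                 · intro h; obtain ⟨u, hu⟩ := h; simp_all
                 · rintro ⟨t', ht⟩; simp_all

-- ----- the last matching piece -----
theorem exists_last_match {α : Type} (p : α → Bool) (ls : List α) (h : ls.any p = true) :
    ∃ pre L suf, ls = pre ++ L :: suf ∧ p L = true ∧ ∀ l ∈ suf, p l = false := by
  induction ls with
  | nil => simp at h
  | cons x xs ih =>
    by_cases hx : xs.any p = true
    · obtain ⟨pre, L, suf, h1, h2, h3⟩ := ih hx
      exact ⟨x :: pre, L, suf, by simp [h1], h2, h3⟩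
    · refine ⟨[], x, xs, rfl, ?_, ?_⟩
      · simp only [List.any_cons, Bool.or_eq_true] at h
        tauto
      · intro l hl
        simp only [List.any_eq_true, not_exists, not_and] at hx
        have := hx l hl
        simp_all

-- ----- A-side reduction -----
def pvScanRevOpt : List String → Option String
  | [] => none
  | l :: ls => if PySem.Str.isIn "FUNCTION_BLOCK " l then some (pvExtract l) else pvScanRevOpt ls

theorem pvScanRevOpt_append (xs ys : List String) :
    pvScanRevOpt (xs ++ ys) = (pvScanRevOpt xs).or (pvScanRevOpt ys) := by
  induction xs with
  | nil => rfl
  | cons x xs ih => simp only [List.cons_append, pvScanRevOpt]; split <;> simp [ih]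

theorem pv_foldl_eq_scanRevOpt (ls : List String) (acc : Option String) :
    ls.foldl (fun acc l => if PySem.Str.isIn "FUNCTION_BLOCK " l then some (pvExtract l) else acc) acc
      = (pvScanRevOpt ls.reverse).or acc := by
  induction ls generalizing acc with
  | nil => rfl
  | cons l ls ih =>
    simp only [List.foldl_cons, List.reverse_cons, ih, pvScanRevOpt_append]
    cases h : pvScanRevOpt ls.reverse <;> simp [pvScanRevOpt] <;> split <;> simp


theorem c_mem_of_singleton_prefix (c : Char) (t : List Char) (i : Nat)
    (h : [c] <+: t.drop i) : c ∈ t := by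
  rcases (singleton_prefix_iff c _).mp h with ⟨t', ht⟩
  have hm : c ∈ t.drop i := by rw [ht]; exact List.mem_cons_self
  exact List.drop_subset i t hm

theorem pvScanRevOpt_none (ls : List String)
    (h : ∀ l ∈ ls, PySem.Str.isIn "FUNCTION_BLOCK " l = false) : pvScanRevOpt ls = none := by
  induction ls with
  | nil => rfl
  | cons l ls ih =>
    simp only [pvScanRevOpt, h l List.mem_cons_self, Bool.false_eq_true, if_false]
    exact ih (fun m hm => h m (List.mem_cons_of_mem _ hm))

-- B's rfind/find arithmetic: on a text decomposed around its last matching line L,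
-- port B returns pvExtract (ofList L)
theorem pvB_eq (s : String) (pre suf : List (List Char)) (L : List Char)
    (hdec : s.toList = (pre.map (· ++ ['\n'])).flatten ++ L ++ (suf.map (['\n'] ++ ·)).flatten)
    (hLfree : '\n' ∉ L)
    (hL : PySem.Chars.isIn "FUNCTION_BLOCK ".toList L = true)
    (hsuf : ∀ m ∈ suf, PySem.Chars.isIn "FUNCTION_BLOCK ".toList m = false) :
    find_project_name_alt s = pvExtract (String.ofList L) := by
  have hneC : "FUNCTION_BLOCK ".toList ≠ [] := by decide
  have hnC : '\n' ∉ "FUNCTION_BLOCK ".toList := by decide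
  set nC : Char := '\n' with hnCdef
  set needleC : List Char := "FUNCTION_BLOCK ".toList with hneedle
  set P : List Char := (pre.map (· ++ [nC])).flatten with hP
  set S : List Char := (suf.map ([nC] ++ ·)).flatten with hS
  set cs : List Char := s.toList with hcs0
  -- last occurrence of the needle inside L
  obtain ⟨j, hj⟩ := (PySem.Chars.exists_prefix_drop_iff_isIn needleC L).mpr hL
  have hjlen : j ≤ L.length := by
    by_contra hgt
    rw [List.drop_eq_nil_of_le (by omega)] at hj
    exact hneC (List.prefix_nil.mp hj)
  have hex : ∃ r : Nat, PySem.Chars.rfind.go L needleC L.length = (r : Int) ∧ r ≤ L.length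
      ∧ needleC <+: L.drop r ∧ ∀ i, r < i → i ≤ L.length → ¬ needleC <+: L.drop i := by
    rcases rfind_go_spec L needleC L.length with ⟨h1, h2⟩ | hr
    · exact absurd hj (h2 j hjlen)
    · exact hr
  obtain ⟨r, hgo, hrle, hocc, hmax'⟩ := hex
  have hmaxL : ∀ i, r < i → ¬ needleC <+: L.drop i := by
    intro i hi hpref
    by_cases hle : i ≤ L.length
    · exact hmax' i hi hle hpref
    · rw [List.drop_eq_nil_of_le (by omega)] at hpref
      exact hneC (List.prefix_nil.mp hpref)
  -- global structure
  have hcs : cs = P ++ (L ++ S) := by rw [hdec, List.append_assoc]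
  have hlen : cs.length = P.length + L.length + S.length := by rw [hcs]; simp; omega
  -- step 1: rfind over the whole text
  have hdrop1 : cs.drop (P.length + r) = L.drop r ++ S := by
    rw [hcs, List.drop_append, List.drop_eq_nil_of_le (by omega),
      show P.length + r - P.length = r by omega, List.nil_append,
      List.drop_append, show r - L.length = 0 by omega, List.drop_zero]
  have hrfind : PySem.Chars.rfind cs needleC = ((P.length + r : Nat) : Int) := by
    apply rfind_eq_of cs needleC (P.length + r) hneC
    · rw [hdrop1]; exact prefix_append_left _ _ _ hocc
    · intro i hi hpref
      by_cases hiL : i ≤ P.length + L.length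
      · -- inside L's zone, after the last occurrence
        have hdropi : cs.drop i = L.drop (i - P.length) ++ S := by
          rw [hcs, List.drop_append, List.drop_eq_nil_of_le (by omega), List.nil_append,
            List.drop_append, show i - P.length - L.length = 0 by omega, List.drop_zero]
        rw [hdropi] at hpref
        have hjj : r < i - P.length := by omega
        cases hsufc : suf with
        | nil =>
          have hSnil : S = [] := by rw [hS, hsufc]; rfl
          rw [hSnil, List.append_nil] at hpref
          exact hmaxL _ hjj hpref
        | cons m ms =>
          have hScons : S = nC :: (m ++ (ms.map ([nC] ++ ·)).flatten) := by
            rw [hS, hsufc]; simp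
          rw [hScons] at hpref
          have := cfree_occ_split needleC (L.drop (i - P.length))
            (m ++ (ms.map ([nC] ++ ·)).flatten) nC hnC hneC 0 (by simpa using hpref)
          rcases this with ⟨_, h2⟩ | ⟨h1, _⟩
          · exact hmaxL _ hjj (by simpa using h2)
          · omega
      · -- strictly after L: inside the S block
        have hdropi : cs.drop i = S.drop (i - P.length - L.length) := by
          rw [hcs, List.drop_append, List.drop_eq_nil_of_le (by omega), List.nil_append,
            List.drop_append, List.drop_eq_nil_of_le (by omega), List.nil_append]
        rw [hdropi] at hpref
        have := no_occ_concat needleC nC hnC hneC [] suf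
          (by intro hinf; exact hneC (List.eq_nil_of_infix_nil hinf))
          (fun m hm => fun hinf => by
            have := hsuf m hm
            rw [PySem.Chars.isIn_eq_false_iff] at this
            exact this hinf)
          (i - P.length - L.length)
        rw [List.nil_append] at this
        exact this hpref
  -- r* is in range
  have hrstar_le : P.length + r ≤ cs.length := by omega
  -- step 2: the start-of-line rfind
  have htake : cs.take (P.length + r) = P ++ L.take r := by
    rw [hcs, List.take_append, List.take_of_length_le (by omega),
      show P.length + r - P.length = r by omega, List.take_append,
      show r - L.length = 0 by omega, List.take_zero, List.append_nil]
  have hstart : PySem.Chars.rfind (cs.take (P.length + r)) [nC] = (P.length : Int) - 1 := by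
    rw [htake]
    cases hprec : pre with
    | nil =>
      have hPnil : P = [] := by rw [hP, hprec]; rfl
      rw [hPnil, List.nil_append]
      rw [rfind_eq_neg_one_of _ _ ?_]
      · simp [hPnil]
      · intro i hpref
        exact hLfree (List.take_subset r L (c_mem_of_singleton_prefix nC _ i hpref))
    | cons a t =>
      obtain ⟨P', hP'⟩ := pre_block_last nC pre (by rw [hprec]; simp)
      rw [← hP] at hP'
      have hPlen : P.length = P'.length + 1 := by rw [hP']; simp
      rw [hP']
      rw [rfind_eq_of _ _ P'.length (by simp) ?_ ?_]
      · simp only [List.length_append, List.length_cons, List.length_nil]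
        push_cast
        omega
      · rw [List.append_assoc, List.drop_append, List.drop_eq_nil_of_le (by omega),
          Nat.sub_self, List.nil_append, List.drop_zero]
        simp
      · intro i hi hpref
        rw [List.append_assoc, List.drop_append, List.drop_eq_nil_of_le (by omega),
          List.nil_append, List.singleton_append,
          show i - P'.length = (i - P'.length - 1) + 1 by omega,
          List.drop_succ_cons] at hpref
        exact hLfree (List.take_subset r L (c_mem_of_singleton_prefix nC _ _ hpref))
  -- step 3: the end-of-line find
  have hlenS : suf = [] → S = [] := by
    intro h; rw [hS, h]; rfl
  have hstopv :
      (if PySem.Chars.findFrom cs [nC] ((P.length + r : Nat) : Int) none = -1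
        then PySem.Str.len s
        else PySem.Chars.findFrom cs [nC] ((P.length + r : Nat) : Int) none)
      = ((P.length + L.length : Nat) : Int) := by
    rw [PySem.Chars.findFrom_natCast cs [nC] (P.length + r) hrstar_le, hdrop1]
    cases hsufc : suf with
    | nil =>
      have hSnil : S = [] := hlenS hsufc
      have hfneg : PySem.Chars.find (L.drop r ++ S) [nC] = -1 := by
        rw [PySem.Chars.find_eq_neg_one_iff]
        intro hinf
        rcases (PySem.Chars.exists_prefix_drop_iff_isIn _ _).mpr
          ((PySem.Chars.isIn_iff_infix _ _).mpr hinf) with ⟨i, hi⟩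
        rw [hSnil, List.append_nil] at hi
        exact hLfree (List.drop_subset r L (c_mem_of_singleton_prefix nC _ _ hi))
      rw [hfneg, if_pos rfl, if_pos rfl, PySem.Str.len, ← hcs0, hlen, hSnil]
      push_cast
      simp
    | cons m ms =>
      have hScons : S = nC :: (m ++ (ms.map ([nC] ++ ·)).flatten) := by
        rw [hS, hsufc]; simp
      have hfind : PySem.Chars.find (L.drop r ++ S) [nC] = ((L.length - r : Nat) : Int) := by
        apply find_eq_of
        · rw [hScons, List.drop_append, List.drop_eq_nil_of_le (by simp),
            List.nil_append, show L.length - r - (L.drop r).length = 0 by simp, List.drop_zero]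
          simp
        · intro i hi hpref
          rw [List.drop_append, show i - (L.drop r).length = 0 by simp; omega,
            List.drop_zero] at hpref
          rcases (singleton_prefix_iff nC _).mp hpref with ⟨t', ht⟩
          cases hdd : (L.drop r).drop i with
          | nil =>
            have hlen2 : (L.drop r).length - i = 0 := by
              have := congrArg List.length hdd
              simp at this ⊢
              omega
            simp at hlen2
            omega
          | cons a u =>
            rw [hdd] at ht
            rw [hScons] at ht
            simp only [List.cons_append] at ht
            have ha : a = nC := by injection ht
            apply hLfree
            rw [← ha]
            exact List.drop_subset r L (List.drop_subset i _ (by rw [hdd]; exact List.mem_cons_self))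
      rw [hfind]
      rw [if_neg (by omega), if_neg (by omega)]
      push_cast
      omega
  -- assemble port B
  have hidx : PySem.Str.rfind s "FUNCTION_BLOCK " = ((P.length + r : Nat) : Int) := by
    rw [PySem.Str.rfind, ← hcs0, ← hneedle, hrfind]
  have hstart' : PySem.Str.rfindFrom s "\n" 0 (some ((P.length + r : Nat) : Int))
      = (P.length : Int) - 1 := by
    rw [PySem.Str.rfindFrom, ← hcs0, show ("\n" : String).toList = [nC] from rfl,
      rfindFrom_zero_some cs [nC] (P.length + r) hrstar_le, hstart]
  have hstopStr : PySem.Str.findFrom s "\n" ((P.length + r : Nat) : Int) none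
      = PySem.Chars.findFrom cs [nC] ((P.length + r : Nat) : Int) none := by
    rw [PySem.Str.findFrom, ← hcs0, show ("\n" : String).toList = [nC] from rfl]
  simp only [find_project_name_alt, hidx]
  rw [if_neg (by omega), hstart', hstopStr, hstopv]
  rw [PySem.Str.slice, ← hcs0, show (P.length : Int) - 1 + 1 = ((P.length : Nat) : Int) by ring]
  congr 1
  rw [PySem.Chars.slice_eq_listSlice,
    show ((P.length + L.length : Nat) : Int) = ((P.length : Nat) : Int) + ((L.length : Nat) : Int) by push_cast; ring,
    PySem.List.slice_natCast_add, hcs, List.drop_append, List.drop_eq_nil_of_le (le_refl _),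
    Nat.sub_self, List.nil_append, List.drop_zero, List.take_append, Nat.sub_self,
    List.take_zero, List.append_nil, List.take_of_length_le (le_refl _)]

-- ===== VERDICT (by name: the statement is the Claim_ definition above) =====
theorem find_project_name_spec : Claim_equal_find_project_name := by
  intro full_text _ hpre
  have hpre' : (((PySem.Str.split? full_text "\n").getD [])).any
      (fun l => PySem.Str.isIn "FUNCTION_BLOCK " l) = true := hpre
  have hsplit : ((PySem.Str.split? full_text "\n").getD [])
      = (splitChar '\n' full_text.toList).map String.ofList := by
    rw [PySem.Str.split?, show ("\n" : String).toList = ['\n'] from rfl, PySem.Chars.split?]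
    simp [splitOn_eq_splitChar]
  rw [hsplit] at hpre'
  have hany : (splitChar '\n' full_text.toList).any
      (fun p => PySem.Chars.isIn "FUNCTION_BLOCK ".toList p) = true := by
    rw [List.any_map] at hpre'
    convert hpre' using 2
    funext p
    simp [PySem.Str.isIn, Function.comp]
  obtain ⟨pre, L, suf, hdec, hL, hsuf⟩ :=
    exists_last_match (fun p => PySem.Chars.isIn "FUNCTION_BLOCK ".toList p) _ hany
  have hLmem : L ∈ splitChar '\n' full_text.toList := by rw [hdec]; simp
  have hLfree : '\n' ∉ L := splitChar_cfree '\n' full_text.toList L hLmem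
  have hdecT : full_text.toList
      = (pre.map (· ++ ['\n'])).flatten ++ L ++ (suf.map (['\n'] ++ ·)).flatten := by
    rw [← intercalate_decomp, ← hdec, splitChar_reconstruct]
  -- A's loop over the split lines returns the last matching line's extraction
  have hA : find_project_name full_text = pvExtract (String.ofList L) := by
    simp only [find_project_name]
    rw [hsplit, hdec]
    rw [PySem.List.foldl_pyRange_zero_pyGetD' ((pre ++ L :: suf).map String.ofList) ""
        (fun acc line => if PySem.Str.isIn "FUNCTION_BLOCK " line then some (pvExtract line) else acc) none]
    rw [pv_foldl_eq_scanRevOpt]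
    have hrev : (((pre ++ L :: suf).map String.ofList)).reverse
        = ((suf.map String.ofList)).reverse
          ++ (String.ofList L :: ((pre.map String.ofList)).reverse) := by
      simp
    rw [hrev, pvScanRevOpt_append, pvScanRevOpt_none ((suf.map String.ofList)).reverse ?_]
    · simp only [pvScanRevOpt, PySem.Str.isIn, String.toList_ofList, hL, if_true,
        Option.or_some, Option.getD_some]
      simp
    · intro l hl
      rw [List.mem_reverse, List.mem_map] at hl
      obtain ⟨m, hm, rfl⟩ := hl
      simp only [PySem.Str.isIn, String.toList_ofList]
      exact hsuf m hm
  rw [Spec_find_project_name, hA,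
    pvB_eq full_text pre suf L hdecT hLfree hL (fun m hm => hsuf m hm)]
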